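-- pv_equiv track=rewrite | github.com/KaryneAlencar/python-academy | Lista/organiza_filas.py | organiza_filas
-- ===== SOURCE A (Python) =====
-- def organiza_filas(lista_corredores):
--     fila1 = []
--     fila2 = []
--     fila3 = []
--     fila4 = []
--     lista_final = []
--     for corredor in lista_corredores:
--         if corredor[1] <= 20:
--             fila1.append(corredor[0])
--         elif corredor[1] <= 40:
--             fila2.append(corredor[0])
--         elif corredor[1] <= 60:
--             fila3.append(corredor[0])
--         else:
--             fila4.append(corredor[0])
--     lista_final.append(fila1)
--     lista_final.append(fila2)
--     lista_final.append(fila3)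
--     lista_final.append(fila4)
--     return lista_final
-- ===== SOURCE B (Python) =====
-- def organiza_filas(lista_corredores):
--     return [
--         [nome for nome, idade in lista_corredores if idade <= 20],
--         [nome for nome, idade in lista_corredores if 20 < idade <= 40],
--         [nome for nome, idade in lista_corredores if 40 < idade <= 60],
--         [nome for nome, idade in lista_corredores if 60 < idade],
--     ]
-- ===== Notes on version B (the rewrite author's own statement) =====
-- stated objective: simpler
-- what changed: Replaces A's single bucketing pass with four mutable accumulator lists and an if/elif cascade by four independent filter comprehensions, one per age band, returned directly as the result list.
import Mathlib
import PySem

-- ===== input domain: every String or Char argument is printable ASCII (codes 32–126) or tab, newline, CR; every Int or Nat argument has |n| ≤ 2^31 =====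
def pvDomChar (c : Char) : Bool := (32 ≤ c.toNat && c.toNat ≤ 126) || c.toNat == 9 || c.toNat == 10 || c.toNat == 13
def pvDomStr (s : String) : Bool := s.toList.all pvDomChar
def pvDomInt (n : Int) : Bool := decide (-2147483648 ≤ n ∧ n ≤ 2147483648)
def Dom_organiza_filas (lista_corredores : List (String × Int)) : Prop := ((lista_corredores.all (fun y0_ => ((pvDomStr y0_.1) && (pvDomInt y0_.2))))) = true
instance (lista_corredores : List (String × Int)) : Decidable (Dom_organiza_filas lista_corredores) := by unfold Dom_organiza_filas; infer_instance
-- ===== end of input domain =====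

-- B replaces A's single bucketing pass (four accumulators, if/elif cascade) by four
-- independent filter comprehensions, one per age band (simpler, same cost).

-- ===== PORT A =====
-- A's single loop over four named accumulator lists, branches in A's order.
def organiza_filas (lista_corredores : List (String × Int)) : List (List String) :=
  let s := lista_corredores.foldl
    (fun (s : List String × List String × List String × List String) corredor =>
      if corredor.2 ≤ 20 then (s.1 ++ [corredor.1], s.2.1, s.2.2.1, s.2.2.2)
      else if corredor.2 ≤ 40 then (s.1, s.2.1 ++ [corredor.1], s.2.2.1, s.2.2.2)
      else if corredor.2 ≤ 60 then (s.1, s.2.1, s.2.2.1 ++ [corredor.1], s.2.2.2)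
      else (s.1, s.2.1, s.2.2.1, s.2.2.2 ++ [corredor.1]))
    ([], [], [], [])
  [s.1, s.2.1, s.2.2.1, s.2.2.2]

-- ===== PORT B =====
-- Each Python comprehension '[nome for nome, idade in l if p idade]' is a filter-then-project pass.
def organiza_filas_alt (lista_corredores : List (String × Int)) : List (List String) :=
  [ (lista_corredores.filter (fun c => decide (c.2 ≤ 20))).map (·.1),
    (lista_corredores.filter (fun c => decide (20 < c.2 ∧ c.2 ≤ 40))).map (·.1),
    (lista_corredores.filter (fun c => decide (40 < c.2 ∧ c.2 ≤ 60))).map (·.1),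
    (lista_corredores.filter (fun c => decide (60 < c.2))).map (·.1) ]

-- ===== PRECONDITION & SPEC =====
def Spec_organiza_filas (lista_corredores : List (String × Int)) (out : List (List String)) : Prop := out = organiza_filas_alt lista_corredores
instance (lista_corredores : List (String × Int)) (out : List (List String)) : Decidable (Spec_organiza_filas lista_corredores out) := by unfold Spec_organiza_filas; infer_instance

-- ===== CLAIM (what is proved, stated in full; the proofs are below) =====
def Claim_equal_organiza_filas : Prop := ∀ (lista_corredores : List (String × Int)), Dom_organiza_filas lista_corredores → Spec_organiza_filas lista_corredores (organiza_filas lista_corredores)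

-- ===== LEMMAS AND PROOFS =====

-- Invariant: A's fold from any start (f1,f2,f3,f4) appends exactly B's four filtered passes.
theorem organiza_filas_fold_eq (l : List (String × Int))
    (f1 f2 f3 f4 : List String) :
    l.foldl
      (fun (s : List String × List String × List String × List String) corredor =>
        if corredor.2 ≤ 20 then (s.1 ++ [corredor.1], s.2.1, s.2.2.1, s.2.2.2)
        else if corredor.2 ≤ 40 then (s.1, s.2.1 ++ [corredor.1], s.2.2.1, s.2.2.2)
        else if corredor.2 ≤ 60 then (s.1, s.2.1, s.2.2.1 ++ [corredor.1], s.2.2.2)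
        else (s.1, s.2.1, s.2.2.1, s.2.2.2 ++ [corredor.1]))
      (f1, f2, f3, f4) =
    (f1 ++ (l.filter (fun c => decide (c.2 ≤ 20))).map (·.1),
     f2 ++ (l.filter (fun c => decide (20 < c.2 ∧ c.2 ≤ 40))).map (·.1),
     f3 ++ (l.filter (fun c => decide (40 < c.2 ∧ c.2 ≤ 60))).map (·.1),
     f4 ++ (l.filter (fun c => decide (60 < c.2))).map (·.1)) := by
  induction l generalizing f1 f2 f3 f4 with
  | nil => simp
  | cons c t ih =>
    rcases c with ⟨nome, idade⟩
    simp only [List.foldl_cons]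
    by_cases h1 : idade ≤ 20
    · have h1' : ¬ (20 < idade) := by omega
      have ha : ¬ (40 < idade) := by omega
      have hb : ¬ (60 < idade) := by omega
      rw [if_pos h1, ih (f1 ++ [nome]) f2 f3 f4]
      simp [List.filter_cons, h1, h1', ha, hb]
    · by_cases h2 : idade ≤ 40
      · have h1' : (20:Int) < idade := by omega
        have h2' : ¬ (40 < idade) := by omega
        have hb : ¬ (60 < idade) := by omega
        rw [if_neg h1, if_pos h2, ih f1 (f2 ++ [nome]) f3 f4]
        simp [List.filter_cons, h1, h2, h1', h2', hb]
      · by_cases h3 : idade ≤ 60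
        · have h2' : (40:Int) < idade := by omega
          have h3' : ¬ (60 < idade) := by omega
          rw [if_neg h1, if_neg h2, if_pos h3, ih f1 f2 (f3 ++ [nome]) f4]
          simp [List.filter_cons, h1, h2, h3, h2', h3']
        · have h3' : (60:Int) < idade := by omega
          rw [if_neg h1, if_neg h2, if_neg h3, ih f1 f2 f3 (f4 ++ [nome])]
          simp [List.filter_cons, h1, h2, h3, h3']

-- ===== VERDICT (by name: the statement is the Claim_ definition above) =====
theorem organiza_filas_spec : Claim_equal_organiza_filas := by
  intro l _
  show organiza_filas l = organiza_filas_alt l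
  simp [organiza_filas, organiza_filas_alt, organiza_filas_fold_eq l [] [] [] []]
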